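-- pv_equiv track=rewrite | github.com/madelein-milagros/labs_algoritmos | laboratorio1/ejer5.py | consecutive_statements
-- ===== SOURCE A (Python) =====
-- def consecutive_statements(n):
--     count = 0
--     for _ in range(n):  # O(n)
--         count += 1  # Simple incremento
--     for i in range(n):  # O(n²)
--         for j in range(n):
--             count += (i * j) % 2  # Cambio en la operación para diferenciación
--     return count
-- ===== SOURCE B (Python) =====
-- def consecutive_statements(n):
--     if n <= 0:
--         return 0
--     return n + (n // 2) ** 2
-- ===== Notes on version B (the rewrite author's own statement) =====
-- stated objective: faster
-- what changed: Replaced the O(n^2) double loop (counting parity products) and the O(n) counting loop by the closed form n + (n//2)^2.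
import Mathlib
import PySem

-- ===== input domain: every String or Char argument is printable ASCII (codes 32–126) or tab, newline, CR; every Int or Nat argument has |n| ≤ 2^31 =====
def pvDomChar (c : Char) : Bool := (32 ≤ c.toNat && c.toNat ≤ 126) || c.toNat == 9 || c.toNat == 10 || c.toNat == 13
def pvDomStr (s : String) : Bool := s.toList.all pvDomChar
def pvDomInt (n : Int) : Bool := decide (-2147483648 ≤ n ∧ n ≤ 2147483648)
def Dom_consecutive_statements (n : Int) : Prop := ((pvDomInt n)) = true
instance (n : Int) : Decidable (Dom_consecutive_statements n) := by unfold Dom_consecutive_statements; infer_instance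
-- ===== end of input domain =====

-- B replaces A's O(n) loop + O(n^2) double loop by the closed form n + (n//2)^2 (asymptotic speed-up).

-- ===== PORT A =====
def consecutive_statements (n : Int) : Int :=
  let count := (PySem.List.pyRange 0 n 1).foldl (fun c _ => c + 1) 0
  (PySem.List.pyRange 0 n 1).foldl
    (fun c i =>
      (PySem.List.pyRange 0 n 1).foldl (fun c2 j => c2 + PySem.Int.mod (i * j) 2) c)
    count

-- ===== PORT B =====
def consecutive_statements_alt (n : Int) : Int :=
  if n ≤ 0 then 0 else n + (PySem.Int.floordiv n 2) ^ 2

-- ===== PRECONDITION & SPEC =====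
def Spec_consecutive_statements (n : Int) (out : Int) : Prop := out = consecutive_statements_alt n
instance (n : Int) (out : Int) : Decidable (Spec_consecutive_statements n out) := by unfold Spec_consecutive_statements; infer_instance

-- ===== CLAIM (what is proved, stated in full; the proofs are below) =====
def Claim_equal_consecutive_statements : Prop := ∀ (n : Int), Dom_consecutive_statements n → Spec_consecutive_statements n (consecutive_statements n)

-- ===== LEMMAS AND PROOFS =====

-- sum of j % 2 for j < m is m / 2
theorem pv_sum_mod_two (m : Nat) :
    ((List.range m).map (fun (j : Nat) => ((j : Int)) % 2)).sum = ((m / 2 : Nat) : Int) := by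
  induction m with
  | zero => norm_num
  | succ m ih =>
    rw [List.range_succ]
    simp only [List.map_append, List.sum_append, ih, List.map_cons, List.map_nil,
      List.sum_cons, List.sum_nil]
    omega

theorem pv_term (a b : Int) :
    PySem.Int.mod (a * b) 2 = (a % 2) * (b % 2) := by
  rw [PySem.Int.mod_eq_emod_of_pos (by norm_num : (0:Int) < 2)]
  conv_lhs => rw [Int.mul_emod]
  have h1 : a % 2 = 0 ∨ a % 2 = 1 := by omega
  have h2 : b % 2 = 0 ∨ b % 2 = 1 := by omega
  rcases h1 with h1 | h1 <;> rcases h2 with h2 | h2 <;> rw [h1, h2] <;> norm_num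

theorem pv_inner (a : Int) (m : Nat) :
    ((List.range m).map (fun (j : Nat) => PySem.Int.mod (a * (j : Int)) 2)).sum
      = (a % 2) * ((m / 2 : Nat) : Int) := by
  have hmap : ((List.range m).map (fun (j : Nat) => PySem.Int.mod (a * (j : Int)) 2))
       = ((List.range m).map (fun (j : Nat) => (a % 2) * (((j : Int)) % 2))) := by
    apply List.map_congr_left
    intro j _
    exact pv_term a (j : Int)
  rw [hmap, List.sum_map_mul_left, pv_sum_mod_two]

theorem consecutive_statements_eq (n : Int) :
    consecutive_statements n = consecutive_statements_alt n := by
  unfold consecutive_statements consecutive_statements_alt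
  by_cases h : n ≤ 0
  · rw [PySem.List.pyRange_one_eq_nil (by omega)]
    simp [h]
  · obtain ⟨m, hm⟩ : ∃ m : Nat, n = (m : Int) := ⟨n.toNat, by omega⟩
    subst hm
    show (PySem.List.pyRange 0 (m : Int) 1).foldl
      (fun c i =>
        (PySem.List.pyRange 0 (m : Int) 1).foldl (fun c2 j => c2 + PySem.Int.mod (i * j) 2) c)
      ((PySem.List.pyRange 0 (m : Int) 1).foldl (fun c _ => c + 1) 0) = _
    rw [PySem.List.pyRange_zero_natCast]
    rw [PySem.List.foldl_add _ (fun _ => (1 : Int)) 0]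
    have hone : (List.map (fun _ => (1 : Int))
        ((List.range m).map (fun (k : Nat) => (k : Int)))).sum = (m : Int) := by simp [Function.comp_def]
    rw [hone]
    have hstep : ∀ (c i : Int),
        List.foldl (fun c2 j => c2 + PySem.Int.mod (i * j) 2) c
          ((List.range m).map (fun (k : Nat) => (k : Int)))
        = c + (i % 2) * ((m / 2 : Nat) : Int) := by
      intro c i
      rw [PySem.List.foldl_add _ (fun j : Int => PySem.Int.mod (i * j) 2) c, List.map_map]
      show c + ((List.range m).map (fun (j : Nat) => PySem.Int.mod (i * (j : Int)) 2)).sum = _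
      rw [pv_inner i m]
    simp only [hstep]
    rw [PySem.List.foldl_add _ (fun i : Int => (i % 2) * ((m / 2 : Nat) : Int)) _]
    rw [List.map_map]
    show (0 + (m : Int)) + ((List.range m).map
        (fun (i : Nat) => (((i : Int)) % 2) * ((m / 2 : Nat) : Int))).sum = _
    rw [List.sum_map_mul_right, pv_sum_mod_two]
    have hfd : PySem.Int.floordiv (m : Int) 2 = ((m / 2 : Nat) : Int) :=
      PySem.Int.floordiv_natCast m 2
    rw [if_neg h, hfd]
    ring

-- ===== VERDICT (by name: the statement is the Claim_ definition above) =====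
theorem consecutive_statements_spec : Claim_equal_consecutive_statements := by
  intro n _
  exact consecutive_statements_eq n
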